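-- pv_equiv track=rewrite | github.com/frankzhiy/AgentLabILD | src/adapters/evidence_atomizer_adapter.py | _detect_forbidden_payload_fields
-- ===== SOURCE A (Python) =====
-- from collections.abc import Mapping
--
-- FORBIDDEN_PAYLOAD_FIELDS = frozenset(
--     {
--         "final_diagnosis",
--         "differential_diagnosis",
--         "hypotheses",
--         "hypothesis_state",
--         "hypothesis_board",
--         "claim_references",
--         "action_candidates",
--         "action_plan",
--         "arbitration_output",
--         "treatment_recommendation",
--         "confidence",
--         "safety_decision",
--         "typed_conflicts",
--         "conflict",
--         "belief_revision",
--         "update_trace",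
--     }
-- )
--
-- def _detect_forbidden_payload_fields(payload: Mapping[str, object]) -> tuple[str, ...]:
--     payload_keys = {key for key in payload.keys() if isinstance(key, str)}
--     forbidden_fields = sorted(payload_keys.intersection(FORBIDDEN_PAYLOAD_FIELDS))
--
--     if not forbidden_fields:
--         return ()
--
--     return tuple(
--         f"payload contains forbidden field: {field_name}" for field_name in forbidden_fields
--     )
-- ===== SOURCE B (Python) =====
-- from collections.abc import Mapping
--
-- # The forbidden vocabulary, pre-sorted once.
-- _FORBIDDEN_SORTED = (
--     "action_candidates",
--     "action_plan",
--     "arbitration_output",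
--     "belief_revision",
--     "claim_references",
--     "confidence",
--     "conflict",
--     "differential_diagnosis",
--     "final_diagnosis",
--     "hypotheses",
--     "hypothesis_board",
--     "hypothesis_state",
--     "safety_decision",
--     "treatment_recommendation",
--     "typed_conflicts",
--     "update_trace",
-- )
--
-- def _detect_forbidden_payload_fields(payload: Mapping[str, object]) -> tuple[str, ...]:
--     # Single accumulator loop over the fixed sorted vocabulary; no key-set
--     # construction, no intersection, no sort of the result.
--     out = []
--     for field_name in _FORBIDDEN_SORTED:
--         if field_name in payload:
--             out.append("payload contains forbidden field: " + field_name)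
--     return tuple(out)
-- ===== Notes on version B (the rewrite author's own statement) =====
-- stated objective: simpler
-- what changed: Instead of building a set of payload keys, intersecting it with the forbidden frozenset and sorting the intersection, B runs one accumulator loop over the fixed pre-sorted 16-word vocabulary, appending a formatted message whenever the word is a key of the payload (no key-set, no intersection, no sort, no empty-case branch).
import Mathlib
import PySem

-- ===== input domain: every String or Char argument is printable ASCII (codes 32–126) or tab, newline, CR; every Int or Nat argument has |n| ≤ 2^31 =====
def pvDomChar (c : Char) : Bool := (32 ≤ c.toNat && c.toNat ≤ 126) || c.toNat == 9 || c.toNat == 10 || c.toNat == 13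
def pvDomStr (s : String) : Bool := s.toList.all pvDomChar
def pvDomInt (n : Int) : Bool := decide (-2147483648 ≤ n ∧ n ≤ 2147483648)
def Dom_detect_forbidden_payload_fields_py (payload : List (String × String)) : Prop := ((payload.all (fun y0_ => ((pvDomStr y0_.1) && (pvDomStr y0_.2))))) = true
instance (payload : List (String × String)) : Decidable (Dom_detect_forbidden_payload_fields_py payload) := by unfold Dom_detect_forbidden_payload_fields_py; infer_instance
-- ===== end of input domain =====

-- B replaces A's key-set + intersection + sort with a single accumulator loop over the
-- pre-sorted forbidden vocabulary, testing key membership in the payload (objective: simpler).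


-- ===== PORT A =====
-- FORBIDDEN_PAYLOAD_FIELDS, a frozenset literal (source order)
def pvForbidden : PySem.Set String := PySem.Set.ofList
  ["final_diagnosis", "differential_diagnosis", "hypotheses", "hypothesis_state",
   "hypothesis_board", "claim_references", "action_candidates", "action_plan",
   "arbitration_output", "treatment_recommendation", "confidence", "safety_decision",
   "typed_conflicts", "conflict", "belief_revision", "update_trace"]

-- payload_keys = {key for key in payload.keys() if isinstance(key, str)} (all keys are str here);
-- forbidden_fields = sorted(payload_keys.intersection(FORBIDDEN_PAYLOAD_FIELDS))
def detect_forbidden_payload_fields_py (payload : List (String × String)) : List String :=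
  if PySem.List.sorted (PySem.Set.inter (PySem.Set.ofList (PySem.Dict.ofList payload).keys) pvForbidden) (fun x => x) false = [] then
    []
  else
    (PySem.List.sorted (PySem.Set.inter (PySem.Set.ofList (PySem.Dict.ofList payload).keys) pvForbidden) (fun x => x) false).map
      (fun field_name => "payload contains forbidden field: " ++ field_name)

-- ===== PORT B =====
-- _FORBIDDEN_SORTED, the vocabulary pre-sorted once
def pvForbiddenSorted : List String :=
  ["action_candidates", "action_plan", "arbitration_output", "belief_revision",
   "claim_references", "confidence", "conflict", "differential_diagnosis",
   "final_diagnosis", "hypotheses", "hypothesis_board", "hypothesis_state",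
   "safety_decision", "treatment_recommendation", "typed_conflicts", "update_trace"]

-- out = []; for field_name in _FORBIDDEN_SORTED: if field_name in payload: out.append(...)
-- 'field_name in payload' (dict key membership) is: some pair of the association list has that key.
def detect_forbidden_payload_fields_py_alt (payload : List (String × String)) : List String :=
  pvForbiddenSorted.foldl
    (fun out field_name =>
      if payload.any (fun kv => kv.1 == field_name) then
        out ++ ["payload contains forbidden field: " ++ field_name]
      else out)
    []

-- ===== PRECONDITION & SPEC =====
def Spec_detect_forbidden_payload_fields_py (payload : List (String × String)) (out : List String) : Prop := out = detect_forbidden_payload_fields_py_alt payload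
instance (payload : List (String × String)) (out : List String) : Decidable (Spec_detect_forbidden_payload_fields_py payload out) := by unfold Spec_detect_forbidden_payload_fields_py; infer_instance

-- ===== CLAIM (what is proved, stated in full; the proofs are below) =====
def Claim_equal_detect_forbidden_payload_fields_py : Prop := ∀ (payload : List (String × String)), Dom_detect_forbidden_payload_fields_py payload → Spec_detect_forbidden_payload_fields_py payload (detect_forbidden_payload_fields_py payload)

-- ===== LEMMAS AND PROOFS =====

-- the pre-sorted vocabulary is strictly increasing
set_option maxRecDepth 8000 in
theorem pvForbiddenSorted_pairwise : pvForbiddenSorted.Pairwise (· < ·) := by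
  have h : (pvForbiddenSorted.map String.toList).Pairwise (· < ·) := by decide
  rw [List.pairwise_map] at h
  exact h.imp (fun hab => String.lt_iff_toList_lt.mpr hab)

-- and a permutation of the source-order vocabulary
set_option maxRecDepth 8000 in
theorem pvForbiddenSorted_perm : pvForbiddenSorted.Perm pvForbidden := by decide

-- Dict.ofList's keys are the distinct payload keys in first-occurrence order
theorem keys_ofList_pairs (l : List (String × String)) :
    (PySem.Dict.ofList l).keys = PySem.Set.ofList (l.map Prod.fst) := by
  simp [PySem.Dict.ofList, PySem.Dict.update, PySem.Dict.keys_foldl_insert_key,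
    PySem.Set.update_nil_left]

-- the direct membership test of B coincides with A's dict-key membership
theorem any_key_eq_contains (payload : List (String × String)) (f : String) :
    payload.any (fun kv => kv.1 == f) = (PySem.Dict.ofList payload).contains f := by
  rw [Bool.eq_iff_iff, List.any_eq_true, PySem.Dict.contains_iff_mem_keys,
    keys_ofList_pairs, PySem.Set.mem_ofList, List.mem_map]
  constructor
  · rintro ⟨kv, hkv, hbeq⟩; exact ⟨kv, hkv, eq_of_beq hbeq⟩
  · rintro ⟨kv, hkv, rfl⟩; exact ⟨kv, hkv, by simp⟩

-- A's sorted intersection IS the vocabulary filtered by B's membership test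
theorem sorted_inter_eq_filter (payload : List (String × String)) :
    PySem.List.sorted (PySem.Set.inter (PySem.Set.ofList (PySem.Dict.ofList payload).keys) pvForbidden) (fun x => x) false
      = pvForbiddenSorted.filter (fun f => payload.any (fun kv => kv.1 == f)) := by
  apply PySem.List.sorted_eq_of_perm_of_pairwise_lt
  · rw [List.perm_ext_iff_of_nodup
      ((pvForbiddenSorted_pairwise.imp ne_of_lt).filter _)
      (PySem.Set.nodup_inter _ _ (PySem.Set.nodup_ofList _))]
    intro x
    simp only [List.mem_filter, any_key_eq_contains, PySem.Set.mem_inter, PySem.Set.mem_ofList,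
      PySem.Dict.contains_iff_mem_keys, pvForbiddenSorted_perm.mem_iff]
    tauto
  · exact pvForbiddenSorted_pairwise.filter _

-- ===== VERDICT (by name: the statement is the Claim_ definition above) =====
theorem detect_forbidden_payload_fields_py_spec : Claim_equal_detect_forbidden_payload_fields_py := by
  intro payload _
  unfold Spec_detect_forbidden_payload_fields_py
  unfold detect_forbidden_payload_fields_py detect_forbidden_payload_fields_py_alt
  rw [PySem.List.foldl_append_if, sorted_inter_eq_filter]
  split
  · next h => rw [h]; rfl
  · simp
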